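-- pv_equiv track=rewrite | github.com/sehoHwang/Programmers | Python/Dev-matching/2021 행렬 테두리 회전하기.py | transform
-- ===== SOURCE A (Python) =====
-- def transform(matrix, q, maxVal):
--     y1, x1, y2, x2 = q[0]-1, q[1]-1, q[2]-1, q[3]-1
--
--     tmp_matrix = [[i for i in matrix[j]] for j in range(len(matrix))]    # 그냥 copy를 하면 기존 값도 수정되기 때문에 이렇게 할당해야함
--
--     minVal = maxVal
--     for i in range(x1, x2+1):
--         if i==x1:
--             tmp_matrix[y1][i] = matrix[y1+1][i]
--             minVal = min(minVal, tmp_matrix[y1][i])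
--         else:
--             tmp_matrix[y1][i] = matrix[y1][i-1]
--             minVal = min(minVal, tmp_matrix[y1][i])
--
--     for j in range(x1, x2+1):
--         if j==x2:
--             tmp_matrix[y2][j] = matrix[y2-1][j]
--             minVal = min(minVal, tmp_matrix[y2][j])
--         else:
--             tmp_matrix[y2][j] = matrix[y2][j+1]
--             minVal = min(minVal, tmp_matrix[y2][j])
--
--     if y1+1<=y2-1:
--         for i in range(y1+1, y2):
--             tmp_matrix[i][x1] = matrix[i+1][x1]
--             minVal = min(minVal, tmp_matrix[i][x1])
--             tmp_matrix[i][x2] = matrix[i-1][x2]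
--             minVal = min(minVal, tmp_matrix[i][x2])
--
--     return tmp_matrix, minVal
-- ===== SOURCE B (Python) =====
-- def transform(matrix, q, maxVal):
--     y1, x1, y2, x2 = q[0]-1, q[1]-1, q[2]-1, q[3]-1
--
--     def top(c): return matrix[y1+1][x1] if c == x1 else matrix[y1][c-1]
--     def bot(c): return matrix[y2-1][x2] if c == x2 else matrix[y2][c+1]
--     def left(r): return matrix[r+1][x1]
--     def right(r): return matrix[r-1][x2]
--
--     def new(r, c):
--         if r == y2 and x1 <= c <= x2: return bot(c)
--         if r == y1 and x1 <= c <= x2: return top(c)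
--         if y1 < r < y2 and c == x2: return right(r)
--         if y1 < r < y2 and c == x1: return left(r)
--         return matrix[r][c]
--
--     out = [[new(r, c) for c in range(len(row))] for r, row in enumerate(matrix)]
--     vals = ([top(c) for c in range(x1, x2+1)]
--             + [bot(c) for c in range(x1, x2+1)]
--             + [v for r in range(y1+1, y2) for v in (left(r), right(r))])
--     return out, min([maxVal] + vals)
-- ===== Notes on version B (the rewrite author's own statement) =====
-- stated objective: simpler
-- what changed: A copies the matrix and mutates the border with three sequential write loops carrying a running minimum; B builds the result directly with a pure per-cell closed-form function (no mutation, no sequential writes) and takes the minimum of maxVal and the placed border values in one expression.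
import Mathlib
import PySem

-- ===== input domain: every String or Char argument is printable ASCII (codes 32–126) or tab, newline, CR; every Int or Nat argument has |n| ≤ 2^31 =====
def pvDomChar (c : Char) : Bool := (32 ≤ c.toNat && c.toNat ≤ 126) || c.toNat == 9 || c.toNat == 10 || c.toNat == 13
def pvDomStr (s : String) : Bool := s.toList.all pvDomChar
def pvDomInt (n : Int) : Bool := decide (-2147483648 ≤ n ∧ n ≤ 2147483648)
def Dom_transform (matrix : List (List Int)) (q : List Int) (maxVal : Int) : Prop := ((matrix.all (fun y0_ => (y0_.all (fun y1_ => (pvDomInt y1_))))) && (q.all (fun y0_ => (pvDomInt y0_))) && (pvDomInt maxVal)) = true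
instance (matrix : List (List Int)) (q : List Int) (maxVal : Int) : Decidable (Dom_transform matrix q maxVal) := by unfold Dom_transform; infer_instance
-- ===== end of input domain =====

-- B replaces A's three in-place border-mutation loops with a pure per-cell closed-form function and a
-- one-expression minimum over the placed border values (simpler decomposition; return value only, A also does not mutate its arguments).


-- ===== PORT A =====
def transform (matrix : List (List Int)) (q : List Int) (maxVal : Int) : List (List Int) × Int :=
  let y1 := PySem.List.pyGetD q 0 0 - 1
  let x1 := PySem.List.pyGetD q 1 0 - 1
  let y2 := PySem.List.pyGetD q 2 0 - 1
  let x2 := PySem.List.pyGetD q 3 0 - 1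
  -- tmp_matrix = [[i for i in matrix[j]] for j in range(len(matrix))]
  let tmp := (PySem.List.pyRange 0 (PySem.List.len matrix) 1).map
    (fun j => (PySem.List.pyGetD matrix j []).map (fun i => i))
  -- first loop (top row), carrying (tmp_matrix, minVal)
  let st1 := (PySem.List.pyRange x1 (x2 + 1) 1).foldl
    (fun (st : List (List Int) × Int) i =>
      if i = x1 then
        let v := PySem.List.pyGetD (PySem.List.pyGetD matrix (y1 + 1) []) i 0
        (PySem.List.pySetD st.1 y1 (PySem.List.pySetD (PySem.List.pyGetD st.1 y1 []) i v), min st.2 v)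
      else
        let v := PySem.List.pyGetD (PySem.List.pyGetD matrix y1 []) (i - 1) 0
        (PySem.List.pySetD st.1 y1 (PySem.List.pySetD (PySem.List.pyGetD st.1 y1 []) i v), min st.2 v))
    (tmp, maxVal)
  -- second loop (bottom row)
  let st2 := (PySem.List.pyRange x1 (x2 + 1) 1).foldl
    (fun (st : List (List Int) × Int) j =>
      if j = x2 then
        let v := PySem.List.pyGetD (PySem.List.pyGetD matrix (y2 - 1) []) j 0
        (PySem.List.pySetD st.1 y2 (PySem.List.pySetD (PySem.List.pyGetD st.1 y2 []) j v), min st.2 v)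
      else
        let v := PySem.List.pyGetD (PySem.List.pyGetD matrix y2 []) (j + 1) 0
        (PySem.List.pySetD st.1 y2 (PySem.List.pySetD (PySem.List.pyGetD st.1 y2 []) j v), min st.2 v))
    st1
  -- third loop (left and right columns), guarded like the Python
  let st3 := if y1 + 1 ≤ y2 - 1 then
      (PySem.List.pyRange (y1 + 1) y2 1).foldl
        (fun (st : List (List Int) × Int) i =>
          let v1 := PySem.List.pyGetD (PySem.List.pyGetD matrix (i + 1) []) x1 0
          let g1 := PySem.List.pySetD st.1 i (PySem.List.pySetD (PySem.List.pyGetD st.1 i []) x1 v1)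
          let m1 := min st.2 v1
          let v2 := PySem.List.pyGetD (PySem.List.pyGetD matrix (i - 1) []) x2 0
          (PySem.List.pySetD g1 i (PySem.List.pySetD (PySem.List.pyGetD g1 i []) x2 v2), min m1 v2))
        st2
    else st2
  st3

-- ===== PORT B =====
-- Source B's helpers top/bot/left/right: the clockwise-predecessor value of a border cell on each side
def pvTopF (matrix : List (List Int)) (y1 x1 : Int) (c : Int) : Int :=
  if c = x1 then PySem.List.pyGetD (PySem.List.pyGetD matrix (y1 + 1) []) x1 0
  else PySem.List.pyGetD (PySem.List.pyGetD matrix y1 []) (c - 1) 0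
def pvBotF (matrix : List (List Int)) (y2 x2 : Int) (c : Int) : Int :=
  if c = x2 then PySem.List.pyGetD (PySem.List.pyGetD matrix (y2 - 1) []) x2 0
  else PySem.List.pyGetD (PySem.List.pyGetD matrix y2 []) (c + 1) 0
def pvLeftF (matrix : List (List Int)) (x1 : Int) (r : Int) : Int :=
  PySem.List.pyGetD (PySem.List.pyGetD matrix (r + 1) []) x1 0
def pvRightF (matrix : List (List Int)) (x2 : Int) (r : Int) : Int :=
  PySem.List.pyGetD (PySem.List.pyGetD matrix (r - 1) []) x2 0

-- the per-cell closed form `new(r, c)` of Source B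
def pvNew (matrix : List (List Int)) (y1 x1 y2 x2 r c : Int) : Int :=
  if r = y2 ∧ x1 ≤ c ∧ c ≤ x2 then pvBotF matrix y2 x2 c
  else if r = y1 ∧ x1 ≤ c ∧ c ≤ x2 then pvTopF matrix y1 x1 c
  else if (y1 < r ∧ r < y2) ∧ c = x2 then pvRightF matrix x2 r
  else if (y1 < r ∧ r < y2) ∧ c = x1 then pvLeftF matrix x1 r
  else PySem.List.pyGetD (PySem.List.pyGetD matrix r []) c 0

def transform_alt (matrix : List (List Int)) (q : List Int) (maxVal : Int) : List (List Int) × Int :=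
  let y1 := PySem.List.pyGetD q 0 0 - 1
  let x1 := PySem.List.pyGetD q 1 0 - 1
  let y2 := PySem.List.pyGetD q 2 0 - 1
  let x2 := PySem.List.pyGetD q 3 0 - 1
  -- out = [[new(r, c) for c in range(len(row))] for r, row in enumerate(matrix)]
  let out := (PySem.List.enumerate matrix).map
    (fun p => (PySem.List.pyRange 0 (PySem.List.len p.2) 1).map (fun c => pvNew matrix y1 x1 y2 x2 p.1 c))
  -- vals = [top(c) …] + [bot(c) …] + [v for r … for v in (left(r), right(r))]
  let vals : List Int :=
    (PySem.List.pyRange x1 (x2 + 1) 1).map (fun c => pvTopF matrix y1 x1 c)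
    ++ (PySem.List.pyRange x1 (x2 + 1) 1).map (fun c => pvBotF matrix y2 x2 c)
    ++ (PySem.List.pyRange (y1 + 1) y2 1).flatMap (fun r => [pvLeftF matrix x1 r, pvRightF matrix x2 r])
  -- min([maxVal] + vals)  (running-min fold)
  (out, vals.foldl min maxVal)

-- ===== PRECONDITION & SPEC =====
-- Pre_ admits q = [y1, x1, y2, x2] describing any (possibly degenerate) in-bounds rectangle of a matrix
-- whose rows are long enough (with y1 not the last row), or an empty rectangle (x2 < x1 and y2 ≤ y1 + 1)
-- on which A touches nothing; outside it A raises (IndexError) or writes/reads rows outside the matrix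
-- through Python negative-index wraparound, an accidental value no one would specify.
def Pre_transform (matrix : List (List Int)) (q : List Int) (maxVal : Int) : Prop :=
  4 ≤ q.length ∧
  ((1 ≤ PySem.List.pyGetD q 0 0 ∧
    PySem.List.pyGetD q 0 0 ≤ PySem.List.pyGetD q 2 0 ∧
    PySem.List.pyGetD q 2 0 ≤ (matrix.length : Int) ∧
    PySem.List.pyGetD q 0 0 < (matrix.length : Int) ∧
    1 ≤ PySem.List.pyGetD q 1 0 ∧
    PySem.List.pyGetD q 1 0 ≤ PySem.List.pyGetD q 3 0 ∧
    ∀ row ∈ matrix, PySem.List.pyGetD q 3 0 ≤ (row.length : Int)) ∨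
   (PySem.List.pyGetD q 3 0 < PySem.List.pyGetD q 1 0 ∧
    PySem.List.pyGetD q 2 0 ≤ PySem.List.pyGetD q 0 0 + 1))
instance (matrix : List (List Int)) (q : List Int) (maxVal : Int) : Decidable (Pre_transform matrix q maxVal) := by
  unfold Pre_transform; infer_instance

def pvWitness_transform : List (List Int) × List Int × Int := ([[1, 2], [3, 4]], ([1, 1, 2, 2], 100))

def Spec_transform (matrix : List (List Int)) (q : List Int) (maxVal : Int) (out : List (List Int) × Int) : Prop := out = transform_alt matrix q maxVal
instance (matrix : List (List Int)) (q : List Int) (maxVal : Int) (out : List (List Int) × Int) : Decidable (Spec_transform matrix q maxVal out) := by unfold Spec_transform; infer_instance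

-- ===== CLAIM (what is proved, stated in full; the proofs are below) =====
def Claim_equal_transform : Prop := ∀ (matrix : List (List Int)) (q : List Int) (maxVal : Int), Dom_transform matrix q maxVal → Pre_transform matrix q maxVal → Spec_transform matrix q maxVal (transform matrix q maxVal)

-- ===== LEMMAS AND PROOFS =====

-- generic cell accessor used by the proof-side characterisations
def pvCell (g : List (List Int)) (r c : Nat) : Int := (g.getD r []).getD c 0

-- sequence of writes into one row y at columns s, s+1, …, s+n-1
def pvRowW (y s : Nat) (f : Nat → Int) (n : Nat) (g : List (List Int)) : List (List Int) :=
  (List.range n).foldl (fun g k => g.set y ((g.getD y []).set (s + k) (f (s + k)))) g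

-- per-row pair of writes at columns x1 and x2 for rows s, …, s+n-1
def pvColW (x1 x2 : Nat) (h1 h2 : Nat → Int) (s n : Nat) (g : List (List Int)) : List (List Int) :=
  (List.range n).foldl (fun g k =>
    let g1 := g.set (s + k) ((g.getD (s + k) []).set x1 (h1 (s + k)))
    g1.set (s + k) ((g1.getD (s + k) []).set x2 (h2 (s + k)))) g

theorem getD_set' {A : Type} (l : List A) (i c : Nat) (a : A) (d : A) :
    (l.set i a).getD c d = if c = i ∧ i < l.length then a else l.getD c d := by
  by_cases hl : i < l.length
  · by_cases h : c = i
    · subst h; simp [List.getD, List.getElem?_set, hl]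
    · simp only [List.getD, List.getElem?_set]
      split_ifs <;> first | rfl | omega
  · rw [List.set_eq_of_length_le (by omega)]
    simp [hl]

theorem getD_set_row (g : List (List Int)) (y r : Nat) (v : List Int) :
    (g.set y v).getD r [] = if r = y ∧ y < g.length then v else g.getD r [] :=
  getD_set' g y r v []

theorem pvRowW_succ (y s : Nat) (f : Nat → Int) (n : Nat) (g : List (List Int)) :
    pvRowW y s f (n + 1) g =
      (pvRowW y s f n g).set y (((pvRowW y s f n g).getD y []).set (s + n) (f (s + n))) := by
  simp [pvRowW, List.range_succ]

theorem pvRowW_len (y s : Nat) (f : Nat → Int) (n : Nat) (g : List (List Int)) :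
    (pvRowW y s f n g).length = g.length := by
  induction n with
  | zero => rfl
  | succ n ih => rw [pvRowW_succ]; simp [ih]

theorem pvRowW_rowlen (y s : Nat) (f : Nat → Int) (n : Nat) (g : List (List Int)) (r : Nat) :
    ((pvRowW y s f n g).getD r []).length = (g.getD r []).length := by
  induction n with
  | zero => rfl
  | succ n ih =>
    rw [pvRowW_succ, getD_set_row]
    split_ifs with h
    · rcases h with ⟨hr, _⟩
      subst hr
      simpa [List.length_set] using ih
    · exact ih

theorem pvRowW_cell (y s : Nat) (f : Nat → Int) (n : Nat) (g : List (List Int)) (r c : Nat)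
    (hy : y < g.length) :
    pvCell (pvRowW y s f n g) r c =
      if r = y ∧ s ≤ c ∧ c < s + n ∧ c < (g.getD y []).length then f c else pvCell g r c := by
  induction n with
  | zero => rw [if_neg (by omega)]; rfl
  | succ n ih =>
    rw [pvRowW_succ]
    unfold pvCell
    rw [getD_set_row]
    have hlen := pvRowW_len y s f n g
    have hrl := pvRowW_rowlen y s f n g y
    by_cases hr : r = y
    · subst hr
      rw [if_pos ⟨rfl, by omega⟩, getD_set']
      unfold pvCell at ih
      rw [ih, hrl]
      split_ifs <;> simp_all <;> omega
    · rw [if_neg (by tauto)]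
      unfold pvCell at ih
      rw [ih]
      split_ifs <;> simp_all

theorem pvColW_succ (x1 x2 : Nat) (h1 h2 : Nat → Int) (s n : Nat) (g : List (List Int)) :
    pvColW x1 x2 h1 h2 s (n + 1) g =
      (let G := pvColW x1 x2 h1 h2 s n g
       let G1 := G.set (s + n) ((G.getD (s + n) []).set x1 (h1 (s + n)))
       G1.set (s + n) ((G1.getD (s + n) []).set x2 (h2 (s + n)))) := by
  simp [pvColW, List.range_succ]

theorem pvColW_len (x1 x2 : Nat) (h1 h2 : Nat → Int) (s n : Nat) (g : List (List Int)) :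
    (pvColW x1 x2 h1 h2 s n g).length = g.length := by
  induction n with
  | zero => rfl
  | succ n ih => rw [pvColW_succ]; simp [ih]

theorem pvColW_rowlen (x1 x2 : Nat) (h1 h2 : Nat → Int) (s n : Nat) (g : List (List Int)) (r : Nat) :
    ((pvColW x1 x2 h1 h2 s n g).getD r []).length = (g.getD r []).length := by
  have aux : ∀ (G : List (List Int)) (y x : Nat) (v : Int),
      ((G.set y ((G.getD y []).set x v)).getD r []).length = (G.getD r []).length := by
    intro G y x v
    rw [getD_set_row]
    split_ifs with h
    · rcases h with ⟨hr, _⟩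
      subst hr
      simp [List.length_set]
    · rfl
  induction n with
  | zero => rfl
  | succ n ih =>
    rw [pvColW_succ]
    simp only []
    rw [aux, aux]
    exact ih

-- last-write-wins characterisation of the paired column writes (valid also when x1 = x2: x2 wins)
theorem pvColW_cell (x1 x2 : Nat) (h1 h2 : Nat → Int) (s n : Nat) (g : List (List Int)) (r c : Nat)
    (hn : s + n ≤ g.length) :
    pvCell (pvColW x1 x2 h1 h2 s n g) r c =
      if s ≤ r ∧ r < s + n ∧ c = x2 ∧ c < (g.getD r []).length then h2 r
      else if s ≤ r ∧ r < s + n ∧ c = x1 ∧ c < (g.getD r []).length then h1 r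
      else pvCell g r c := by
  have auxc : ∀ (G : List (List Int)) (y : Nat) (v : List Int), r ≠ y →
      pvCell (G.set y v) r c = pvCell G r c := by
    intro G y v h
    unfold pvCell
    rw [getD_set_row, if_neg (by tauto)]
  induction n with
  | zero => rw [if_neg (by omega), if_neg (by omega)]; rfl
  | succ n ih =>
    rw [pvColW_succ]
    simp only []
    have hlen := pvColW_len x1 x2 h1 h2 s n g
    have hrl := pvColW_rowlen x1 x2 h1 h2 s n g (s + n)
    have ih' := ih (by omega)
    by_cases hr : r = s + n
    · subst hr
      have hG1row : ((pvColW x1 x2 h1 h2 s n g).set (s + n)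
            (((pvColW x1 x2 h1 h2 s n g).getD (s + n) []).set x1 (h1 (s + n)))).getD (s + n) []
          = ((pvColW x1 x2 h1 h2 s n g).getD (s + n) []).set x1 (h1 (s + n)) := by
        rw [getD_set_row, if_pos ⟨rfl, by omega⟩]
      unfold pvCell
      rw [hG1row, getD_set_row, if_pos ⟨rfl, by simp [List.length_set]; omega⟩]
      rw [getD_set', getD_set']
      unfold pvCell at ih'
      rw [ih']
      simp only [List.length_set, hrl]
      split_ifs <;> first | rfl | omega
    · rw [auxc _ _ _ hr, auxc _ _ _ hr]
      rw [ih']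
      split_ifs <;> first | rfl | omega

-- a state-pair fold whose two components do not interact splits into two folds
theorem foldl_split {A B C : Type} (L : List A) (body : B × C → A → B × C)
    (F : B → A → B) (G : C → A → C)
    (h : ∀ st i, body st i = (F st.1 i, G st.2 i)) (a : B) (b : C) :
    L.foldl body (a, b) = (L.foldl F a, L.foldl G b) := by
  induction L generalizing a b with
  | nil => rfl
  | cons x t ih => simp only [List.foldl_cons, h]; exact ih _ _

-- an Int range-fold is a Nat range-fold
theorem foldl_pyRange_cast {B : Type} (a b : Nat) (F : B → Int → B) (init : B) :
    (PySem.List.pyRange (a : Int) (b : Int) 1).foldl F init =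
      (List.range (b - a)).foldl (fun st k => F st ((a + k : Nat) : Int)) init := by
  rw [PySem.List.pyRange_one, List.foldl_map]
  have h1 : ((b : Int) - a).toNat = b - a := by omega
  rw [h1]
  all_goals
    exact congrFun (congrFun (congrArg List.foldl (funext fun st => funext fun k => rfl)) init) _

theorem map_pyRange_zero_cast {B : Type} (b : Nat) (F : Int → B) :
    (PySem.List.pyRange 0 (b : Int) 1).map F = (List.range b).map (fun k => F ((k : Nat) : Int)) := by
  rw [PySem.List.pyRange_zero_natCast, List.map_map]
  rfl

theorem foldl_min_flatMap_pair {A : Type} (L : List A) (f g : A → Int) (m0 : Int) :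
    (L.flatMap (fun r => [f r, g r])).foldl min m0 =
      L.foldl (fun m r => min (min m (f r)) (g r)) m0 := by
  induction L generalizing m0 with
  | nil => rfl
  | cons x t ih => simp [List.flatMap_cons, ih]

-- Nat-indexed characterisation of the per-cell function pvNew (the F-helpers stay abstract)
theorem pvNew_cast (M : List (List Int)) (n1 m1 n2 m2 r c : Nat) :
    pvNew M (n1 : Int) (m1 : Int) (n2 : Int) (m2 : Int) (r : Int) (c : Int) =
      (if r = n2 ∧ m1 ≤ c ∧ c ≤ m2 then pvBotF M (n2 : Int) (m2 : Int) (c : Int)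
       else if r = n1 ∧ m1 ≤ c ∧ c ≤ m2 then pvTopF M (n1 : Int) (m1 : Int) (c : Int)
       else if (n1 < r ∧ r < n2) ∧ c = m2 then pvRightF M (m2 : Int) (r : Int)
       else if (n1 < r ∧ r < n2) ∧ c = m1 then pvLeftF M (m1 : Int) (r : Int)
       else pvCell M r c) := by
  unfold pvNew
  simp only [Nat.cast_inj, Nat.cast_le, Nat.cast_lt]
  split_ifs <;> first | rfl | (simp [pvCell, PySem.List.pyGetD_natCast])

-- the matrix copy in A is the matrix itself
theorem copy_eq (matrix : List (List Int)) :
    (PySem.List.pyRange 0 (PySem.List.len matrix) 1).map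
      (fun j => (PySem.List.pyGetD matrix j []).map (fun i => i)) = matrix := by
  have h : (fun (j : Int) => (PySem.List.pyGetD matrix j []).map (fun i => i)) =
      (fun (j : Int) => PySem.List.pyGetD matrix j []) := by
    funext j
    exact List.map_id' _
  rw [h]
  exact PySem.List.map_pyGetD_pyRange_zero matrix []

-- A's final grid, as nested write-loops, and A's final minimum, as nested min-folds
def pvAGrid (matrix : List (List Int)) (n1 m1 n2 m2 : Nat) : List (List Int) :=
  pvColW m1 m2 (fun r => pvLeftF matrix (m1 : Int) (r : Int)) (fun r => pvRightF matrix (m2 : Int) (r : Int))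
    (n1 + 1) (n2 - (n1 + 1))
    (pvRowW n2 m1 (fun c => pvBotF matrix (n2 : Int) (m2 : Int) (c : Int)) (m2 + 1 - m1)
      (pvRowW n1 m1 (fun c => pvTopF matrix (n1 : Int) (m1 : Int) (c : Int)) (m2 + 1 - m1) matrix))

def pvAMin (matrix : List (List Int)) (n1 m1 n2 m2 : Nat) (maxVal : Int) : Int :=
  (List.range (n2 - (n1 + 1))).foldl
    (fun m k => min (min m (pvLeftF matrix (m1 : Int) ((n1 + 1 + k : Nat) : Int)))
      (pvRightF matrix (m2 : Int) ((n1 + 1 + k : Nat) : Int)))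
    ((List.range (m2 + 1 - m1)).foldl
      (fun m k => min m (pvBotF matrix (n2 : Int) (m2 : Int) ((m1 + k : Nat) : Int)))
      ((List.range (m2 + 1 - m1)).foldl
        (fun m k => min m (pvTopF matrix (n1 : Int) (m1 : Int) ((m1 + k : Nat) : Int))) maxVal))

def pvBGrid (matrix : List (List Int)) (n1 m1 n2 m2 : Nat) : List (List Int) :=
  (List.range matrix.length).map (fun (r : Nat) =>
    (List.range ((matrix.getD r []).length)).map (fun (c : Nat) =>
      pvNew matrix (n1 : Int) (m1 : Int) (n2 : Int) (m2 : Int) (r : Int) (c : Int)))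

-- A's first loop
theorem loop1_eq (matrix g0 : List (List Int)) (mv : Int) (n1 m1 m2 : Nat) :
    (PySem.List.pyRange (m1 : Int) ((m2 : Int) + 1) 1).foldl
      (fun (st : List (List Int) × Int) i =>
        if i = (m1 : Int) then
          (PySem.List.pySetD st.1 (n1 : Int) (PySem.List.pySetD (PySem.List.pyGetD st.1 (n1 : Int) []) i
             (PySem.List.pyGetD (PySem.List.pyGetD matrix ((n1 : Int) + 1) []) i 0)),
           min st.2 (PySem.List.pyGetD (PySem.List.pyGetD matrix ((n1 : Int) + 1) []) i 0))
        else
          (PySem.List.pySetD st.1 (n1 : Int) (PySem.List.pySetD (PySem.List.pyGetD st.1 (n1 : Int) []) i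
             (PySem.List.pyGetD (PySem.List.pyGetD matrix (n1 : Int) []) (i - 1) 0)),
           min st.2 (PySem.List.pyGetD (PySem.List.pyGetD matrix (n1 : Int) []) (i - 1) 0)))
      (g0, mv)
    = (pvRowW n1 m1 (fun c => pvTopF matrix (n1 : Int) (m1 : Int) (c : Int)) (m2 + 1 - m1) g0,
       (List.range (m2 + 1 - m1)).foldl
         (fun m k => min m (pvTopF matrix (n1 : Int) (m1 : Int) ((m1 + k : Nat) : Int))) mv) := by
  rw [foldl_split _ _
    (fun (g : List (List Int)) (i : Int) =>
      PySem.List.pySetD g (n1 : Int) (PySem.List.pySetD (PySem.List.pyGetD g (n1 : Int) []) i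
        (pvTopF matrix (n1 : Int) (m1 : Int) i)))
    (fun (m : Int) (i : Int) => min m (pvTopF matrix (n1 : Int) (m1 : Int) i))
    (by
      intro st i
      by_cases hi : i = (m1 : Int) <;> simp [pvTopF, hi])]
  rw [show ((m2 : Int) + 1) = ((m2 + 1 : Nat) : Int) by push_cast; ring]
  simp only [foldl_pyRange_cast]
  congr 1
  unfold pvRowW
  refine PySem.List.foldl_congr_mem _ _ _ _ ?_
  intro g k hk
  simp only [PySem.List.pySetD_natCast, PySem.List.pyGetD_natCast]

-- A's second loop
theorem loop2_eq (matrix g0 : List (List Int)) (mv : Int) (n2 m1 m2 : Nat) :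
    (PySem.List.pyRange (m1 : Int) ((m2 : Int) + 1) 1).foldl
      (fun (st : List (List Int) × Int) j =>
        if j = (m2 : Int) then
          (PySem.List.pySetD st.1 (n2 : Int) (PySem.List.pySetD (PySem.List.pyGetD st.1 (n2 : Int) []) j
             (PySem.List.pyGetD (PySem.List.pyGetD matrix ((n2 : Int) - 1) []) j 0)),
           min st.2 (PySem.List.pyGetD (PySem.List.pyGetD matrix ((n2 : Int) - 1) []) j 0))
        else
          (PySem.List.pySetD st.1 (n2 : Int) (PySem.List.pySetD (PySem.List.pyGetD st.1 (n2 : Int) []) j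
             (PySem.List.pyGetD (PySem.List.pyGetD matrix (n2 : Int) []) (j + 1) 0)),
           min st.2 (PySem.List.pyGetD (PySem.List.pyGetD matrix (n2 : Int) []) (j + 1) 0)))
      (g0, mv)
    = (pvRowW n2 m1 (fun c => pvBotF matrix (n2 : Int) (m2 : Int) (c : Int)) (m2 + 1 - m1) g0,
       (List.range (m2 + 1 - m1)).foldl
         (fun m k => min m (pvBotF matrix (n2 : Int) (m2 : Int) ((m1 + k : Nat) : Int))) mv) := by
  rw [foldl_split _ _
    (fun (g : List (List Int)) (j : Int) =>
      PySem.List.pySetD g (n2 : Int) (PySem.List.pySetD (PySem.List.pyGetD g (n2 : Int) []) j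
        (pvBotF matrix (n2 : Int) (m2 : Int) j)))
    (fun (m : Int) (j : Int) => min m (pvBotF matrix (n2 : Int) (m2 : Int) j))
    (by
      intro st j
      by_cases hj : j = (m2 : Int) <;> simp [pvBotF, hj])]
  rw [show ((m2 : Int) + 1) = ((m2 + 1 : Nat) : Int) by push_cast; ring]
  simp only [foldl_pyRange_cast]
  congr 1
  unfold pvRowW
  refine PySem.List.foldl_congr_mem _ _ _ _ ?_
  intro g k hk
  simp only [PySem.List.pySetD_natCast, PySem.List.pyGetD_natCast]

-- A's third loop
theorem loop3_eq (matrix g0 : List (List Int)) (mv : Int) (n1 n2 m1 m2 : Nat) :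
    (PySem.List.pyRange ((n1 : Int) + 1) (n2 : Int) 1).foldl
      (fun (st : List (List Int) × Int) i =>
        (PySem.List.pySetD
           (PySem.List.pySetD st.1 i (PySem.List.pySetD (PySem.List.pyGetD st.1 i []) (m1 : Int)
              (PySem.List.pyGetD (PySem.List.pyGetD matrix (i + 1) []) (m1 : Int) 0)))
           i
           (PySem.List.pySetD
              (PySem.List.pyGetD
                (PySem.List.pySetD st.1 i (PySem.List.pySetD (PySem.List.pyGetD st.1 i []) (m1 : Int)
                   (PySem.List.pyGetD (PySem.List.pyGetD matrix (i + 1) []) (m1 : Int) 0))) i [])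
              (m2 : Int)
              (PySem.List.pyGetD (PySem.List.pyGetD matrix (i - 1) []) (m2 : Int) 0)),
         min (min st.2 (PySem.List.pyGetD (PySem.List.pyGetD matrix (i + 1) []) (m1 : Int) 0))
           (PySem.List.pyGetD (PySem.List.pyGetD matrix (i - 1) []) (m2 : Int) 0)))
      (g0, mv)
    = (pvColW m1 m2 (fun r => pvLeftF matrix (m1 : Int) (r : Int)) (fun r => pvRightF matrix (m2 : Int) (r : Int))
         (n1 + 1) (n2 - (n1 + 1)) g0,
       (List.range (n2 - (n1 + 1))).foldl
         (fun m k => min (min m (pvLeftF matrix (m1 : Int) ((n1 + 1 + k : Nat) : Int)))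
           (pvRightF matrix (m2 : Int) ((n1 + 1 + k : Nat) : Int))) mv) := by
  rw [foldl_split _ _
    (fun (g : List (List Int)) (i : Int) =>
      PySem.List.pySetD
        (PySem.List.pySetD g i (PySem.List.pySetD (PySem.List.pyGetD g i []) (m1 : Int)
           (pvLeftF matrix (m1 : Int) i)))
        i
        (PySem.List.pySetD
           (PySem.List.pyGetD
             (PySem.List.pySetD g i (PySem.List.pySetD (PySem.List.pyGetD g i []) (m1 : Int)
                (pvLeftF matrix (m1 : Int) i))) i [])
           (m2 : Int)
           (pvRightF matrix (m2 : Int) i)))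
    (fun (m : Int) (i : Int) =>
      min (min m (pvLeftF matrix (m1 : Int) i)) (pvRightF matrix (m2 : Int) i))
    (by intro st i; rfl)]
  rw [show ((n1 : Int) + 1) = ((n1 + 1 : Nat) : Int) by push_cast; ring]
  simp only [foldl_pyRange_cast]
  congr 1
  unfold pvColW
  refine PySem.List.foldl_congr_mem _ _ _ _ ?_
  intro g k hk
  simp only [PySem.List.pySetD_natCast, PySem.List.pyGetD_natCast]

theorem A_eq (matrix : List (List Int)) (q : List Int) (maxVal : Int) (n1 m1 n2 m2 : Nat)
    (h0 : PySem.List.pyGetD q 0 0 = (n1 : Int) + 1)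
    (h1 : PySem.List.pyGetD q 1 0 = (m1 : Int) + 1)
    (h2 : PySem.List.pyGetD q 2 0 = (n2 : Int) + 1)
    (h3 : PySem.List.pyGetD q 3 0 = (m2 : Int) + 1) :
    transform matrix q maxVal =
      (pvAGrid matrix n1 m1 n2 m2, pvAMin matrix n1 m1 n2 m2 maxVal) := by
  have en1 : PySem.List.pyGetD q 0 0 - 1 = (n1 : Int) := by omega
  have em1 : PySem.List.pyGetD q 1 0 - 1 = (m1 : Int) := by omega
  have en2 : PySem.List.pyGetD q 2 0 - 1 = (n2 : Int) := by omega
  have em2 : PySem.List.pyGetD q 3 0 - 1 = (m2 : Int) := by omega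
  simp only [transform, en1, em1, en2, em2]
  rw [copy_eq, loop1_eq, loop2_eq, loop3_eq]
  unfold pvAGrid pvAMin
  by_cases hg : (n1 : Int) + 1 ≤ (n2 : Int) - 1
  · rw [if_pos hg]
  · rw [if_neg hg]
    rw [show n2 - (n1 + 1) = 0 from by omega]
    rfl

theorem B_eq (matrix : List (List Int)) (q : List Int) (maxVal : Int) (n1 m1 n2 m2 : Nat)
    (h0 : PySem.List.pyGetD q 0 0 = (n1 : Int) + 1)
    (h1 : PySem.List.pyGetD q 1 0 = (m1 : Int) + 1)
    (h2 : PySem.List.pyGetD q 2 0 = (n2 : Int) + 1)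
    (h3 : PySem.List.pyGetD q 3 0 = (m2 : Int) + 1) :
    transform_alt matrix q maxVal =
      (pvBGrid matrix n1 m1 n2 m2, pvAMin matrix n1 m1 n2 m2 maxVal) := by
  have en1 : PySem.List.pyGetD q 0 0 - 1 = (n1 : Int) := by omega
  have em1 : PySem.List.pyGetD q 1 0 - 1 = (m1 : Int) := by omega
  have en2 : PySem.List.pyGetD q 2 0 - 1 = (n2 : Int) := by omega
  have em2 : PySem.List.pyGetD q 3 0 - 1 = (m2 : Int) := by omega
  simp only [transform_alt, en1, em1, en2, em2]
  congr 1
  · -- the grid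
    rw [PySem.List.enumerate_eq_map_pyRange matrix ([] : List Int), List.map_map,
        PySem.List.len_eq, map_pyRange_zero_cast]
    unfold pvBGrid
    refine List.map_congr_left fun r _ => ?_
    simp only [Function.comp_apply]
    rw [PySem.List.pyGetD_natCast, PySem.List.len_eq, map_pyRange_zero_cast]
  · -- the minimum
    simp only [List.foldl_append, List.foldl_map]
    rw [show ((m2 : Int) + 1) = ((m2 + 1 : Nat) : Int) by push_cast; ring,
        show ((n1 : Int) + 1) = ((n1 + 1 : Nat) : Int) by push_cast; ring]
    rw [foldl_min_flatMap_pair]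
    simp only [foldl_pyRange_cast]
    rfl

theorem grid_eq (matrix : List (List Int)) (n1 m1 n2 m2 : Nat)
    (hn : n1 ≤ n2) (hm : m1 ≤ m2) (hL : n2 < matrix.length) (hL1 : n1 < matrix.length)
    (hW : ∀ r : Nat, r < matrix.length → m2 < (matrix.getD r []).length) :
    pvBGrid matrix n1 m1 n2 m2 = pvAGrid matrix n1 m1 n2 m2 := by
  have hAlen : (pvAGrid matrix n1 m1 n2 m2).length = matrix.length := by
    unfold pvAGrid
    rw [pvColW_len, pvRowW_len, pvRowW_len]
  have hArow : ∀ r : Nat, ((pvAGrid matrix n1 m1 n2 m2).getD r []).length = (matrix.getD r []).length := by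
    intro r
    unfold pvAGrid
    rw [pvColW_rowlen, pvRowW_rowlen, pvRowW_rowlen]
  apply List.ext_getElem
  · unfold pvBGrid
    simp only [List.length_map, List.length_range, hAlen]
  · intro r hr1 hr2
    have hrB : r < matrix.length := by
      unfold pvBGrid at hr1
      simpa using hr1
    have hcell : ∀ c : Nat, c < (matrix.getD r []).length →
        pvNew matrix (n1 : Int) (m1 : Int) (n2 : Int) (m2 : Int) (r : Int) (c : Int) =
          pvCell (pvAGrid matrix n1 m1 n2 m2) r c := by
      intro c hc
      have hWr := hW r hrB
      have hWn1 := hW n1 (by omega)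
      have hWn2 := hW n2 (by omega)
      unfold pvAGrid
      rw [pvColW_cell _ _ _ _ _ _ _ _ _ (by rw [pvRowW_len, pvRowW_len]; omega)]
      rw [pvRowW_cell _ _ _ _ _ _ _ (by rw [pvRowW_len]; omega)]
      rw [pvRowW_cell _ _ _ _ _ _ _ (by omega)]
      simp only [pvRowW_rowlen]
      rw [pvNew_cast matrix n1 m1 n2 m2 r c]
      split_ifs <;> first | rfl | omega
    apply List.ext_getElem
    · unfold pvBGrid
      simp only [List.getElem_map, List.getElem_range, List.length_map, List.length_range]
      have h := hArow r
      rw [List.getD_eq_getElem _ _ hr2] at h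
      exact h.symm
    · intro c hc1 hc2
      have hcW : c < (matrix.getD r []).length := by
        unfold pvBGrid at hc1
        simp only [List.getElem_map, List.getElem_range, List.length_map, List.length_range] at hc1
        exact hc1
      have eA : pvCell (pvAGrid matrix n1 m1 n2 m2) r c = (pvAGrid matrix n1 m1 n2 m2)[r][c] := by
        unfold pvCell
        rw [List.getD_eq_getElem _ _ hr2, List.getD_eq_getElem _ _ hc2]
      unfold pvBGrid
      simp only [List.getElem_map, List.getElem_range]
      rw [← eA]
      exact hcell c hcW

theorem pvNew_deg (M : List (List Int)) (y1 x1 y2 x2 r c : Int)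
    (h1 : x2 < x1) (h2 : y2 ≤ y1 + 1) :
    pvNew M y1 x1 y2 x2 r c = PySem.List.pyGetD (PySem.List.pyGetD M r []) c 0 := by
  unfold pvNew
  rw [if_neg (by omega), if_neg (by omega), if_neg (by omega), if_neg (by omega)]

-- A and B agree when the rectangle is empty: nothing is touched
theorem AB_deg (matrix : List (List Int)) (q : List Int) (maxVal : Int)
    (hd1 : PySem.List.pyGetD q 3 0 < PySem.List.pyGetD q 1 0)
    (hd2 : PySem.List.pyGetD q 2 0 ≤ PySem.List.pyGetD q 0 0 + 1) :
    transform matrix q maxVal = transform_alt matrix q maxVal := by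
  have e1 : PySem.List.pyRange (PySem.List.pyGetD q 1 0 - 1) (PySem.List.pyGetD q 3 0 - 1 + 1) 1 = [] :=
    PySem.List.pyRange_one_eq_nil (by omega)
  have e3 : PySem.List.pyRange (PySem.List.pyGetD q 0 0 - 1 + 1) (PySem.List.pyGetD q 2 0 - 1) 1 = [] :=
    PySem.List.pyRange_one_eq_nil (by omega)
  simp only [transform, transform_alt, e1, e3, List.foldl_nil, List.map_nil, List.flatMap_nil,
    List.append_nil]
  rw [if_neg (by omega), copy_eq]
  refine Prod.ext ?_ rfl
  rw [PySem.List.enumerate_eq_map_pyRange matrix ([] : List Int), List.map_map,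
      PySem.List.len_eq, map_pyRange_zero_cast]
  apply List.ext_getElem
  · simp
  · intro r hr1 hr2
    have hrm : r < matrix.length := by simpa using hr2
    simp only [List.getElem_map, List.getElem_range, Function.comp_apply]
    rw [PySem.List.pyGetD_natCast, PySem.List.len_eq, map_pyRange_zero_cast]
    rw [List.getD_eq_getElem _ _ hrm]
    apply List.ext_getElem
    · simp
    · intro c hc1 hc2
      simp only [List.getElem_map, List.getElem_range]
      rw [pvNew_deg _ _ _ _ _ _ _ (by omega) (by omega)]
      rw [PySem.List.pyGetD_natCast, PySem.List.pyGetD_natCast, List.getD_eq_getElem _ _ hrm]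
      exact (List.getD_eq_getElem _ _ hc1).symm

theorem AB_eq (matrix : List (List Int)) (q : List Int) (maxVal : Int) (n1 m1 n2 m2 : Nat)
    (h0 : PySem.List.pyGetD q 0 0 = (n1 : Int) + 1)
    (h1 : PySem.List.pyGetD q 1 0 = (m1 : Int) + 1)
    (h2 : PySem.List.pyGetD q 2 0 = (n2 : Int) + 1)
    (h3 : PySem.List.pyGetD q 3 0 = (m2 : Int) + 1)
    (hn : n1 ≤ n2) (hm : m1 ≤ m2) (hL : n2 < matrix.length) (hL1 : n1 < matrix.length)
    (hW : ∀ r : Nat, r < matrix.length → m2 < (matrix.getD r []).length) :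
    transform matrix q maxVal = transform_alt matrix q maxVal := by
  rw [A_eq matrix q maxVal n1 m1 n2 m2 h0 h1 h2 h3,
      B_eq matrix q maxVal n1 m1 n2 m2 h0 h1 h2 h3,
      grid_eq matrix n1 m1 n2 m2 hn hm hL hL1 hW]

-- ===== VERDICT (by name: the statement is the Claim_ definition above) =====
theorem transform_spec : Claim_equal_transform := by
  intro matrix q maxVal hdom hpre
  unfold Spec_transform
  obtain ⟨hq4, hrest⟩ := hpre
  rcases hrest with ⟨ha, hb, hc, hcc, hd, he, hf⟩ | ⟨hd1, hd2⟩
  · have hW : ∀ r : Nat, r < matrix.length →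
        (PySem.List.pyGetD q 3 0 - 1).toNat < (matrix.getD r []).length := by
      intro r hr
      have hmem : matrix.getD r [] ∈ matrix := by
        rw [List.getD_eq_getElem _ _ hr]
        exact List.getElem_mem hr
      have := hf _ hmem
      omega
    exact AB_eq matrix q maxVal
      (PySem.List.pyGetD q 0 0 - 1).toNat (PySem.List.pyGetD q 1 0 - 1).toNat
      (PySem.List.pyGetD q 2 0 - 1).toNat (PySem.List.pyGetD q 3 0 - 1).toNat
      (by omega) (by omega) (by omega) (by omega) (by omega) (by omega) (by omega) (by omega) hW
  · exact AB_deg matrix q maxVal hd1 hd2
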